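-- pv_equiv track=rewrite | github.com/Yossefmohammed/daleel-ai | data_scraper.py | _ensure_source_diversity
-- ===== SOURCE A (Python) =====
-- def _ensure_source_diversity(jobs: list, max_per_source: int = 120) -> list:
--     """
--     Cap each source at max_per_source jobs so no single source dominates
--     the saved database.  Jobs are already ordered by relevance so we keep
--     the first max_per_source from each source.
--     """
--     buckets: dict[str, list] = {}
--     for j in jobs:
--         src = j.get("source", "Unknown")
--         buckets.setdefault(src, [])
--         if len(buckets[src]) < max_per_source:
--             buckets[src].append(j)
--
--     # interleave so the CSV isn't source-sorted
--     combined, max_len = [], max((len(v) for v in buckets.values()), default=0)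
--     sources_list = list(buckets.values())
--     for i in range(max_len):
--         for src_jobs in sources_list:
--             if i < len(src_jobs):
--                 combined.append(src_jobs[i])
--     return combined
-- ===== SOURCE B (Python) =====
-- def _ensure_source_diversity(jobs: list, max_per_source: int = 120) -> list:
--     """Cap each source at max_per_source and interleave round-robin.
--
--     Alternative decomposition: list of sources in first-appearance order,
--     per-source capped column via filter+slice, then round-robin peeling of
--     column heads instead of a positional index loop.
--     """
--     seen = []
--     for j in jobs:
--         s = j.get("source", "Unknown")
--         if s not in seen:
--             seen.append(s)
--     cap = max(0, max_per_source)
--     cols = [[j for j in jobs if j.get("source", "Unknown") == s][:cap] for s in seen]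
--     cols = [c for c in cols if c]
--     out = []
--     while cols:
--         out.extend(c[0] for c in cols)
--         cols = [c[1:] for c in cols if c[1:]]
--     return out
-- ===== Notes on version B (the rewrite author's own statement) =====
-- stated objective: alternative
-- what changed: A builds an insertion-ordered dict of capped per-source buckets and interleaves them with a nested positional index loop over range(max_len); B instead collects the sources in first-appearance order, builds each capped column by a per-source filter plus slice, and produces the interleave by recursively peeling the heads off the nonempty columns (round-robin), with no dict and no index arithmetic.
import Mathlib
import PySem

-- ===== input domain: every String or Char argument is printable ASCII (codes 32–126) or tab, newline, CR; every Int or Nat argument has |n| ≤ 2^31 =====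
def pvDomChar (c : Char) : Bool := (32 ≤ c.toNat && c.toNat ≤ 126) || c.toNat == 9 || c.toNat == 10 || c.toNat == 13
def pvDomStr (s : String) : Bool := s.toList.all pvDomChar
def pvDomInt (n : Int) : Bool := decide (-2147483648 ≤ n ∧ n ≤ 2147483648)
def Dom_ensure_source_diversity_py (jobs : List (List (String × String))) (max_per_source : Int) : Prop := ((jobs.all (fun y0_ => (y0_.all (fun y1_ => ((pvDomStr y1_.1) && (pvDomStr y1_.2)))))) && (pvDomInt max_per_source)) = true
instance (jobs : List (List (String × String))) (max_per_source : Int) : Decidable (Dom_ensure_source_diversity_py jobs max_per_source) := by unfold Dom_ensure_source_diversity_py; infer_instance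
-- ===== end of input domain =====

-- B replaces A's incremental capped-bucket dict + positional nested interleave loop by
-- first-appearance sources + per-source filter/slice columns + recursive round-robin peeling
-- of column heads (alternative decomposition, no speed claim).

-- ===== PORT A =====
-- j.get("source", "Unknown")  (shared helper: both Pythons call exactly this)
def pyGetSrc (j : List (String × String)) : String :=
  (PySem.Dict.mk j).getD "source" "Unknown"

-- body of A's first for-loop (setdefault, then capped append)
def stepA (m : Int) (b : PySem.Dict String (List (List (String × String))))
    (j : List (String × String)) : PySem.Dict String (List (List (String × String))) :=
  let src := pyGetSrc j
  let b1 := b.setdefault src []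
  if ((b1.getD src []).length : Int) < m then b1.modify src [] (fun l => l ++ [j]) else b1

-- max((len(v) for v in vals), default=0): every length is ≥ 0, so the running max from 0 is exact
def pyMaxLen (vals : List (List (List (String × String)))) : Nat :=
  vals.foldl (fun a v => max a v.length) 0

def ensure_source_diversity_py (jobs : List (List (String × String))) (max_per_source : Int) :
    List (List (String × String)) :=
  let buckets := jobs.foldl (stepA max_per_source) PySem.Dict.empty
  let sources_list := buckets.values
  let maxLen := pyMaxLen sources_list
  -- range(max_len) with max_len ≥ 0; src_jobs[i] is guarded by i < len(src_jobs), so getD is exact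
  (List.range maxLen).foldl
    (fun combined i =>
      sources_list.foldl
        (fun c sj => if i < sj.length then c ++ [sj.getD i []] else c) combined)
    []

-- ===== PORT B =====
-- termination-measure facts for the round-robin while-loop (cited by roundRobin's decreasing_by)
theorem rr_sum_le (L : List (List (List (String × String)))) :
    ((((L.map List.tail).filter (fun t => !t.isEmpty)).map List.length).sum
      + ((L.map List.tail).filter (fun t => !t.isEmpty)).length)
    ≤ (L.map List.length).sum := by
  induction L with
  | nil => simp
  | cons c cs ih =>
    cases h : c.tail.isEmpty with
    | true =>
      simp only [List.map_cons, List.filter_cons, h, Bool.not_true, Bool.false_eq_true, if_false,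
        List.sum_cons]
      omega
    | false =>
      have hc : 1 ≤ c.length := by
        have h1 := List.length_pos_of_ne_nil ((List.isEmpty_eq_false_iff).mp h)
        simp at h1
        omega
      simp only [List.map_cons, List.filter_cons, h, Bool.not_false, if_true, List.sum_cons,
        List.length_cons, List.length_tail]
      omega

theorem rr_dec (cols : List (List (List (String × String)))) (h : ¬ cols = []) :
    ((((cols.map List.tail).filter (fun t => !t.isEmpty)).map List.length).sum
      + ((cols.map List.tail).filter (fun t => !t.isEmpty)).length)
    < (cols.map List.length).sum + cols.length := by
  have h1 := rr_sum_le cols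
  have h2 : 1 ≤ cols.length := by
    cases cols with
    | nil => exact absurd rfl h
    | cons a l => simp
  omega

-- the 'while cols:' loop: emit all heads, keep the nonempty tails
def roundRobin (cols : List (List (List (String × String)))) : List (List (String × String)) :=
  if h : cols = [] then []
  else (cols.map (fun c => c.headD []))   -- c[0]: every c is nonempty by construction
       ++ roundRobin ((cols.map (fun c => c.drop 1)).filter (fun t => !t.isEmpty))
termination_by (cols.map List.length).sum + cols.length
decreasing_by simpa [List.drop_one] using rr_dec cols h

def ensure_source_diversity_py_alt (jobs : List (List (String × String))) (max_per_source : Int) :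
    List (List (String × String)) :=
  let seen := jobs.foldl
    (fun seen j => if pyGetSrc j ∈ seen then seen else seen ++ [pyGetSrc j]) ([] : List String)
  let cap := (max 0 max_per_source).toNat   -- max(0, max_per_source); [:cap] with cap ≥ 0 is take cap — exact
  let cols := seen.map (fun s => (jobs.filter (fun j => pyGetSrc j == s)).take cap)
  let cols := cols.filter (fun c => !c.isEmpty)
  roundRobin cols

-- ===== PRECONDITION & SPEC =====
def Spec_ensure_source_diversity_py (jobs : List (List (String × String))) (max_per_source : Int) (out : List (List (String × String))) : Prop := out = ensure_source_diversity_py_alt jobs max_per_source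
instance (jobs : List (List (String × String))) (max_per_source : Int) (out : List (List (String × String))) : Decidable (Spec_ensure_source_diversity_py jobs max_per_source out) := by unfold Spec_ensure_source_diversity_py; infer_instance

-- ===== CLAIM (what is proved, stated in full; the proofs are below) =====
def Claim_equal_ensure_source_diversity_py : Prop := ∀ (jobs : List (List (String × String))) (max_per_source : Int), Dom_ensure_source_diversity_py jobs max_per_source → Spec_ensure_source_diversity_py jobs max_per_source (ensure_source_diversity_py jobs max_per_source)

-- ===== LEMMAS AND PROOFS =====

-- keys of one A-step
theorem keys_stepA (m : Int) (b : PySem.Dict String (List (List (String × String))))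
    (j : List (String × String)) :
    (stepA m b j).keys = if pyGetSrc j ∈ b.keys then b.keys else b.keys ++ [pyGetSrc j] := by
  unfold stepA
  dsimp only
  by_cases hc : b.contains (pyGetSrc j)
  · rw [PySem.Dict.setdefault_of_contains _ _ hc]
    have hm : pyGetSrc j ∈ b.keys := (PySem.Dict.contains_iff_mem_keys _ _).mp hc
    rw [if_pos hm]
    split
    · rw [PySem.Dict.keys_modify, PySem.Dict.keys_insert_of_contains _ _ hc]
    · rfl
  · have hc' : b.contains (pyGetSrc j) = false := by simpa using hc
    have hm : ¬ pyGetSrc j ∈ b.keys := fun hmem =>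
      hc ((PySem.Dict.contains_iff_mem_keys _ _).mpr hmem)
    rw [PySem.Dict.setdefault_of_not_contains _ _ hc']
    rw [if_neg hm]
    split
    · rw [PySem.Dict.keys_modify, PySem.Dict.insert_insert_self,
        PySem.Dict.keys_insert_of_not_contains _ _ hc']
    · rw [PySem.Dict.keys_insert_of_not_contains _ _ hc']

-- getD of one A-step, at any key
theorem getD_stepA (m : Int) (b : PySem.Dict String (List (List (String × String))))
    (j : List (String × String)) (s : String) :
    (stepA m b j).getD s []
      = if pyGetSrc j = s ∧ ((b.getD s []).length : Int) < m
        then b.getD s [] ++ [j] else b.getD s [] := by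
  unfold stepA
  dsimp only
  have hset : ∀ t, (b.setdefault (pyGetSrc j) []).getD t [] = b.getD t [] := by
    intro t
    by_cases hc : b.contains (pyGetSrc j)
    · rw [PySem.Dict.setdefault_of_contains _ _ hc]
    · have hc' : b.contains (pyGetSrc j) = false := by simpa using hc
      rw [PySem.Dict.setdefault_of_not_contains _ _ hc', PySem.Dict.getD_insert]
      split
      · next heq => subst heq; exact (PySem.Dict.getD_of_not_contains _ _ hc').symm
      · rfl
  rw [hset]
  split
  · next hlt =>
    rw [PySem.Dict.getD_modify]
    split
    · next he => subst he; rw [hset, if_pos ⟨rfl, hlt⟩]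
    · next he => rw [hset, if_neg (by rintro ⟨h1, -⟩; exact he h1.symm)]
  · next hlt =>
    rw [hset, if_neg (by rintro ⟨h1, h2⟩; subst h1; exact hlt h2)]

-- A's bucket fold, per key: the first cap-many jobs of that source
theorem getD_foldA (m : Int) (jobs : List (List (String × String)))
    (d : PySem.Dict String (List (List (String × String)))) (s : String) :
    (jobs.foldl (stepA m) d).getD s []
      = d.getD s [] ++ ((jobs.filter (fun j => pyGetSrc j == s)).take
          ((max 0 m).toNat - (d.getD s []).length)) := by
  induction jobs generalizing d with
  | nil => simp
  | cons j rest ih =>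
    rw [List.foldl_cons, ih, getD_stepA, List.filter_cons]
    by_cases hs : pyGetSrc j = s
    · by_cases hlt : ((d.getD s []).length : Int) < m
      · have hcap : (d.getD s []).length < (max 0 m).toNat := by omega
        rw [if_pos ⟨hs, hlt⟩]
        simp only [hs, beq_self_eq_true, if_pos, List.length_append, List.length_cons,
          List.length_nil]
        have hstep : (max 0 m).toNat - (d.getD s []).length
            = ((max 0 m).toNat - ((d.getD s []).length + (0 + 1))) + 1 := by omega
        rw [hstep, List.take_succ_cons]
        simp [List.append_assoc]
      · have hcap : ¬ (d.getD s []).length < (max 0 m).toNat := by omega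
        rw [if_neg (by rintro ⟨-, h2⟩; exact hlt h2)]
        rw [if_pos (by simp [hs])]
        have h0 : (max 0 m).toNat - (d.getD s []).length = 0 := by omega
        rw [h0, List.take_zero, List.take_zero]
    · rw [if_neg (by rintro ⟨h1, -⟩; exact hs h1)]
      rw [if_neg (by simp [hs])]

-- A's bucket fold: its keys are B's seen fold
theorem keys_foldA (m : Int) (jobs : List (List (String × String)))
    (d : PySem.Dict String (List (List (String × String)))) :
    (jobs.foldl (stepA m) d).keys
      = jobs.foldl (fun seen j => if pyGetSrc j ∈ seen then seen else seen ++ [pyGetSrc j]) d.keys := by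
  induction jobs generalizing d with
  | nil => rfl
  | cons j rest ih =>
    rw [List.foldl_cons, List.foldl_cons, ih, keys_stepA]

theorem nodup_seenFold (jobs : List (List (String × String))) (seen : List String)
    (h : seen.Nodup) :
    (jobs.foldl (fun seen j => if pyGetSrc j ∈ seen then seen else seen ++ [pyGetSrc j]) seen).Nodup := by
  induction jobs generalizing seen with
  | nil => exact h
  | cons j rest ih =>
    rw [List.foldl_cons]
    split
    · exact ih _ h
    · next hmem =>
      refine ih _ ?_
      simp only [List.nodup_append, List.nodup_singleton, true_and]
      constructor
      · exact h
      · intro a ha b hb heq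
        rw [List.mem_singleton] at hb
        exact hmem (hb ▸ heq ▸ ha)

-- one row of the interleave: the i-th element of every column that is long enough
def rowI (i : Nat) (cols : List (List (List (String × String)))) : List (List (String × String)) :=
  (cols.filter (fun c => decide (i < c.length))).map (fun c => c.getD i [])

-- foldr form of pyMaxLen
def mxr (cols : List (List (List (String × String)))) : Nat :=
  cols.foldr (fun v r => max v.length r) 0

theorem pyMaxLen_eq_mxr (cols : List (List (List (String × String)))) (a : Nat) :
    cols.foldl (fun a v => max a v.length) a = max a (mxr cols) := by
  induction cols generalizing a with
  | nil => simp [mxr]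
  | cons c cs ih => simp [mxr, List.foldl_cons, ih, Nat.max_assoc]

theorem mxr_filter (cols : List (List (List (String × String)))) :
    mxr (cols.filter (fun t => !t.isEmpty)) = mxr cols := by
  induction cols with
  | nil => rfl
  | cons c cs ih =>
    simp only [mxr, List.filter_cons] at ih ⊢
    cases h : c.isEmpty with
    | true =>
      have hc : c = [] := List.isEmpty_iff.mp h
      subst hc
      simpa using ih
    | false =>
      simp only [h, Bool.not_false, if_true, List.foldr_cons, ih]

theorem mxr_drop1 (cols : List (List (List (String × String)))) :
    mxr (cols.map (fun c => c.drop 1)) = mxr cols - 1 := by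
  induction cols with
  | nil => rfl
  | cons c cs ih =>
    simp only [mxr, List.map_cons, List.foldr_cons, List.length_drop] at *
    omega

theorem mxr_zero (cols : List (List (List (String × String))))
    (hne : ∀ c ∈ cols, c ≠ []) (h : mxr cols = 0) : cols = [] := by
  cases cols with
  | nil => rfl
  | cons c cs =>
    exfalso
    have hc : c ≠ [] := hne c (by simp)
    have : 0 < c.length := List.length_pos_of_ne_nil hc
    simp only [mxr, List.foldr_cons] at h
    omega

-- a row of the peeled columns is the next row of the original columns
theorem row_next (i : Nat) (cols : List (List (List (String × String)))) :
    rowI i ((cols.map (fun c => c.drop 1)).filter (fun t => !t.isEmpty)) = rowI (i+1) cols := by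
  unfold rowI
  rw [List.filter_filter]
  have hpq : (fun (t : List (List (String × String))) => decide (i < t.length) && !t.isEmpty)
      = fun t => decide (i < t.length) := by
    funext t
    cases ht : t.isEmpty with
    | true =>
      have h0 : t = [] := List.isEmpty_iff.mp ht
      subst h0; simp
    | false => simp [ht]
  rw [hpq, List.filter_map, List.map_map]
  have hfil : ((fun (t : List (List (String × String))) => decide (i < t.length))
        ∘ (fun (c : List (List (String × String))) => c.drop 1))
      = fun (c : List (List (String × String))) => decide (i + 1 < c.length) := by
    funext c
    simp only [Function.comp, List.length_drop]
    exact decide_eq_decide.mpr (by omega)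
  rw [hfil]
  apply List.map_congr_left
  intro c hc
  simp only [Function.comp, List.getD_eq_getElem?_getD, List.getElem?_drop]
  rw [Nat.add_comm]

-- empty columns contribute nothing to a row
theorem rowI_filter (i : Nat) (cols : List (List (List (String × String)))) :
    rowI i (cols.filter (fun t => !t.isEmpty)) = rowI i cols := by
  unfold rowI
  rw [List.filter_filter]
  congr 1
  apply List.filter_congr
  intro t ht
  cases h : t.isEmpty with
  | true =>
    have h0 : t = [] := List.isEmpty_iff.mp h
    subst h0; simp
  | false => simp [h]

-- the round-robin peeling loop produces the rows in order
theorem rr_spec (n : Nat) : ∀ (cols : List (List (List (String × String)))),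
    (∀ c ∈ cols, c ≠ []) → mxr cols = n →
    roundRobin cols = (List.range n).flatMap (fun i => rowI i cols) := by
  induction n with
  | zero =>
    intro cols hne h
    have hc : cols = [] := mxr_zero cols hne h
    subst hc
    rw [roundRobin]
    simp
  | succ n ih =>
    intro cols hne h
    have hcols : ¬ cols = [] := by
      intro e; subst e; simp [mxr] at h
    rw [roundRobin, dif_neg hcols]
    have hne' : ∀ c ∈ (cols.map (fun c => c.drop 1)).filter (fun t => !t.isEmpty), c ≠ [] := by
      intro c hc
      have := List.of_mem_filter hc
      simpa [List.isEmpty_iff] using this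
    have hmx : mxr ((cols.map (fun c => c.drop 1)).filter (fun t => !t.isEmpty)) = n := by
      rw [mxr_filter, mxr_drop1]
      omega
    rw [ih _ hne' hmx]
    have hheads : cols.map (fun c => c.headD []) = rowI 0 cols := by
      unfold rowI
      rw [List.filter_eq_self.mpr (by
        intro c hc
        simpa using List.length_pos_of_ne_nil (hne c hc))]
      apply List.map_congr_left
      intro c hc
      cases c with
      | nil => rfl
      | cons a l => rfl
    rw [hheads, List.range_succ_eq_map, List.flatMap_cons, List.flatMap_map]
    congr 1
    apply List.flatMap_congr
    intro i hi
    simp only [Nat.succ_eq_add_one]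
    exact row_next i cols

-- A's nested interleave loop produces the rows in order
theorem aLoop (vals : List (List (List (String × String)))) (N : Nat) :
    (List.range N).foldl
      (fun combined i =>
        vals.foldl (fun c sj => if i < sj.length then c ++ [sj.getD i []] else c) combined)
      []
    = (List.range N).flatMap (fun i => rowI i vals) := by
  have hinner : ∀ (acc : List (List (String × String))) (i : Nat), i ∈ List.range N →
      vals.foldl (fun c sj => if i < sj.length then c ++ [sj.getD i []] else c) acc
        = acc ++ rowI i vals := by
    intro acc i _
    exact PySem.List.foldl_append_ite (fun sj => i < sj.length) (fun sj => sj.getD i []) vals acc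
  rw [PySem.List.foldl_congr_mem _ _ _ _ hinner]
  rw [PySem.List.foldl_append_eq_flatMap]
  rfl

-- ===== VERDICT (by name: the statement is the Claim_ definition above) =====
theorem ensure_source_diversity_py_spec : Claim_equal_ensure_source_diversity_py := by
  intro jobs m _
  unfold Spec_ensure_source_diversity_py
  unfold ensure_source_diversity_py ensure_source_diversity_py_alt
  dsimp only
  have hseen0 : (jobs.foldl (stepA m) PySem.Dict.empty).keys
      = jobs.foldl (fun seen j => if pyGetSrc j ∈ seen then seen else seen ++ [pyGetSrc j]) [] := by
    rw [keys_foldA, PySem.Dict.keys_empty]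
  have hnodup : (jobs.foldl (stepA m) PySem.Dict.empty).keys.Nodup := by
    rw [hseen0]; exact nodup_seenFold jobs [] List.nodup_nil
  have hvals : (jobs.foldl (stepA m) PySem.Dict.empty).values
      = (jobs.foldl (fun seen j => if pyGetSrc j ∈ seen then seen else seen ++ [pyGetSrc j]) []).map
          (fun s => (jobs.filter (fun j => pyGetSrc j == s)).take (max 0 m).toNat) := by
    rw [PySem.Dict.values_eq_map_keys _ hnodup []]
    rw [hseen0]
    apply List.map_congr_left
    intro s _
    rw [getD_foldA, PySem.Dict.getD_empty]
    simp
  rw [hvals]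
  set cols := (jobs.foldl (fun seen j => if pyGetSrc j ∈ seen then seen else seen ++ [pyGetSrc j]) []).map
      (fun s => (jobs.filter (fun j => pyGetSrc j == s)).take (max 0 m).toNat) with hcols
  have hN : pyMaxLen cols = mxr cols := by
    unfold pyMaxLen
    rw [pyMaxLen_eq_mxr]
    exact Nat.zero_max _
  rw [hN, aLoop]
  rw [rr_spec (mxr (cols.filter (fun t => !t.isEmpty))) _ ?hne rfl]
  · rw [mxr_filter]
    apply List.flatMap_congr
    intro i _
    exact (rowI_filter i cols).symm
  · intro c hc
    have := List.of_mem_filter hc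
    simpa [List.isEmpty_iff] using this
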